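-- pv_equiv track=rewrite | github.com/dkhobragade/Python_Questions | Binary_Search/Number_and_Digit_Sum.py | numberCount
-- ===== SOURCE A (Python) =====
-- def sumofDigits(n):
--     s = 0
--     while n != 0:
--         rem = n % 10
--         s = s + rem
--         n = n // 10
--     return s
--
-- def numberCount(n, k):
--     low = 1
--     high = n
--     while low <= high:
--         mid = (high + low) // 2
--         s = sumofDigits(mid)
--         if mid - s >= k:
--             high = mid - 1
--         else:
--             low = mid + 1
--     return high
-- ===== SOURCE B (Python) =====
-- def sumofDigits(n):
--     s = 0
--     while n != 0:
--         rem = n % 10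
--         s = s + rem
--         n = n // 10
--     return s
--
-- def numberCount(n, k):
--     # x - sumofDigits(x) is nondecreasing, so the answer is min(n, t - 1)
--     # where t is the least x >= 1 with x - sumofDigits(x) >= k.
--     # Every x <= max(k, 1) - 1 has x - sumofDigits(x) < k, so start the scan there.
--     x = max(k, 1)
--     while x - sumofDigits(x) < k:
--         x += 1
--     return min(n, x - 1)
-- ===== Notes on version B (the rewrite author's own statement) =====
-- stated objective: simpler
-- what changed: Replaces the binary search over [1,n] by a short forward scan from max(k,1) for the least x with x - sumofDigits(x) >= k (the digit-sum deficit is monotone and every x < max(k,1) is below the threshold), returning min(n, x-1).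
import Mathlib
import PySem

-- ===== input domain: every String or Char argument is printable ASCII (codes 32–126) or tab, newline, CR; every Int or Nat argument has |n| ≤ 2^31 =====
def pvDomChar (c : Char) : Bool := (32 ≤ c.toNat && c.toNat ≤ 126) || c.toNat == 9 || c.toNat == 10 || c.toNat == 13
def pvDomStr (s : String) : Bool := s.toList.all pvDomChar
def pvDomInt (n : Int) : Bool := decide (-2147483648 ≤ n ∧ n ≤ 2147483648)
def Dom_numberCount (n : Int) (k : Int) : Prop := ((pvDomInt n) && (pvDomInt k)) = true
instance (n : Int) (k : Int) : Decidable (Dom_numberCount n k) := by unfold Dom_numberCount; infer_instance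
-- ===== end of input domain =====

-- B replaces A's binary search over [1, n] by a short forward scan from max(k, 1) for the
-- least x with x - sumofDigits(x) ≥ k, returning min(n, x - 1); objective: simpler.

-- ===== PORT A =====
-- helper sumofDigits: Python's 'while n != 0' loop, fuel-guarded for totality only.
-- The loop divides n by 10 each round, so n.toNat rounds always suffice; the 'n ≤ 0'
-- test merges Python's 'n != 0' exit with the guard for n < 0, where Python diverges
-- (A only calls this with n ≥ 1); for n = 0 it returns s exactly as Python does.
def sodGoF : Nat → Int → Int → Int
  | 0, _, s => s
  | fuel + 1, n, s =>
      if n ≤ 0 then s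
      else sodGoF fuel (PySem.Int.floordiv n 10) (s + PySem.Int.mod n 10)

def sumofDigits (n : Int) : Int := sodGoF n.toNat n 0

-- A's binary-search loop; low/high/k are the loop state, returning the final high.
-- Fuel-guarded for totality only: each round shrinks [low, high] by at least one,
-- so the initial interval length is always enough fuel.
def ncGoF : Nat → Int → Int → Int → Int
  | 0, _, high, _ => high
  | fuel + 1, low, high, k =>
      if low ≤ high then
        let mid := PySem.Int.floordiv (high + low) 2
        let s := sumofDigits mid
        if mid - s ≥ k then ncGoF fuel low (mid - 1) k else ncGoF fuel (mid + 1) high k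
      else high

def numberCount (n : Int) (k : Int) : Int := ncGoF n.toNat 1 n k

-- ===== PORT B =====
-- B's scan loop: first x (from the start value) with x - sumofDigits(x) ≥ k.
-- Fuel-guarded for totality only: while the condition holds, either x ≤ 0 and the scan
-- moves toward k, or x > 0 and x < 2k + 20 (since sumofDigits(x) ≤ 9 + x // 10), so the
-- chosen fuel always outlasts the loop.
def bGoF : Nat → Int → Int → Int
  | 0, x, _ => x
  | fuel + 1, x, k => if x - sumofDigits x < k then bGoF fuel (x + 1) k else x

def bGo (x k : Int) : Int := bGoF ((2 * k + 20 - x).toNat + (k - x).toNat) x k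

def numberCount_alt (n : Int) (k : Int) : Int := min n (bGo (max k 1) k - 1)

-- ===== PRECONDITION & SPEC =====
def Spec_numberCount (n : Int) (k : Int) (out : Int) : Prop := out = numberCount_alt n k
instance (n : Int) (k : Int) (out : Int) : Decidable (Spec_numberCount n k out) := by unfold Spec_numberCount; infer_instance

-- ===== CLAIM (what is proved, stated in full; the proofs are below) =====
def Claim_equal_numberCount : Prop := ∀ (n : Int) (k : Int), Dom_numberCount n k → Spec_numberCount n k (numberCount n k)

-- ===== LEMMAS AND PROOFS =====

theorem sodF_base (f : Nat) (n s : Int) (h : n ≤ 0) : sodGoF f n s = s := by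
  cases f with
  | zero => rfl
  | succ f => simp [sodGoF, h]

theorem sodF_acc : ∀ (f : Nat) (n s : Int), sodGoF f n s = s + sodGoF f n 0 := by
  intro f
  induction f with
  | zero => intro n s; simp [sodGoF]
  | succ f ih =>
      intro n s
      by_cases h : n ≤ 0
      · rw [sodF_base _ _ _ h, sodF_base _ _ _ h]; ring
      · show (if n ≤ 0 then s else _) = s + (if n ≤ 0 then 0 else _)
        simp only [h, if_false]
        rw [ih _ (s + PySem.Int.mod n 10), ih _ (0 + PySem.Int.mod n 10)]
        ring

theorem sodF_irrel : ∀ (f g : Nat) (n s : Int), n.toNat ≤ f → n.toNat ≤ g →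
    sodGoF f n s = sodGoF g n s := by
  intro f
  induction f with
  | zero =>
      intro g n s hf hg
      have hn : n ≤ 0 := by omega
      rw [sodF_base _ _ _ hn, sodF_base _ _ _ hn]
  | succ f ih =>
      intro g n s hf hg
      by_cases hn : n ≤ 0
      · rw [sodF_base _ _ _ hn, sodF_base _ _ _ hn]
      · obtain ⟨g', hg'⟩ : ∃ g', g = g' + 1 := ⟨g - 1, by omega⟩
        subst hg'
        show (if n ≤ 0 then s else sodGoF f (PySem.Int.floordiv n 10) _) =
             (if n ≤ 0 then s else sodGoF g' (PySem.Int.floordiv n 10) _)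
        simp only [hn, if_false]
        have h10 : PySem.Int.floordiv n 10 = n / 10 :=
          PySem.Int.floordiv_eq_ediv_of_pos (by omega)
        rw [h10]
        exact ih g' (n / 10) _ (by omega) (by omega)

theorem sod_base (n : Int) (h : n ≤ 0) : sumofDigits n = 0 := sodF_base _ _ _ h

theorem sod_unfold (n : Int) (h : 0 < n) :
    sumofDigits n = n % 10 + sumofDigits (n / 10) := by
  unfold sumofDigits
  obtain ⟨m, hm⟩ : ∃ m, n.toNat = m + 1 := ⟨n.toNat - 1, by omega⟩
  rw [hm]
  show (if n ≤ 0 then 0 else sodGoF m (PySem.Int.floordiv n 10) (0 + PySem.Int.mod n 10)) = _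
  simp only [not_le.mpr h, if_false]
  rw [PySem.Int.floordiv_eq_ediv_of_pos (by omega : (0:Int) < 10),
      PySem.Int.mod_eq_emod_of_pos (by omega : (0:Int) < 10)]
  rw [sodF_acc m (n / 10) (0 + n % 10),
      sodF_irrel m (n / 10).toNat (n / 10) 0 (by omega) le_rfl]
  ring

theorem sod_nonneg : ∀ (m : Nat) (n : Int), n.toNat ≤ m → 0 ≤ sumofDigits n := by
  intro m
  induction m with
  | zero => intro n h; rw [sod_base n (by omega)]
  | succ m ih =>
      intro n h
      by_cases hn : n ≤ 0
      · rw [sod_base n hn]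
      · push_neg at hn
        rw [sod_unfold n hn]
        have := ih (n / 10) (by omega)
        omega

theorem sod_le_self : ∀ (m : Nat) (n : Int), n.toNat ≤ m → 0 ≤ n → sumofDigits n ≤ n := by
  intro m
  induction m with
  | zero => intro n h h0; rw [sod_base n (by omega)]; omega
  | succ m ih =>
      intro n h h0
      by_cases hn : n ≤ 0
      · rw [sod_base n hn]; omega
      · push_neg at hn
        rw [sod_unfold n hn]
        have := ih (n / 10) (by omega) (by omega)
        omega

theorem sod_le_div (x : Int) (hx : 0 < x) : sumofDigits x ≤ 9 + x / 10 := by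
  rw [sod_unfold x hx]
  have := sod_le_self (x / 10).toNat (x / 10) le_rfl (by omega)
  omega

theorem sod_one : sumofDigits 1 = 1 := by
  rw [sod_unfold 1 (by omega)]
  norm_num [sod_base 0 le_rfl]

theorem sod_pos : ∀ (m : Nat) (n : Int), n.toNat ≤ m → 0 < n → 1 ≤ sumofDigits n := by
  intro m
  induction m with
  | zero => intro n h h0; omega
  | succ m ih =>
      intro n h h0
      rw [sod_unfold n h0]
      by_cases h10 : n < 10
      · have hq : n / 10 = 0 := by omega
        rw [hq, sod_base 0 le_rfl]; omega
      · have := ih (n / 10) (by omega) (by omega)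
        have := sod_nonneg (n / 10).toNat (n / 10) le_rfl
        omega

theorem sod_succ : ∀ (m : Nat) (n : Int), n.toNat ≤ m → 0 ≤ n →
    sumofDigits (n + 1) ≤ sumofDigits n + 1 := by
  intro m
  induction m with
  | zero =>
      intro n h h0
      have hn : n = 0 := by omega
      subst hn
      simp only [zero_add]
      rw [sod_one, sod_base 0 le_rfl]
      norm_num
  | succ m ih =>
      intro n h h0
      by_cases hn : n = 0
      · subst hn
        simp only [zero_add]
        rw [sod_one, sod_base 0 le_rfl]
        norm_num
      · have hpos : 0 < n := by omega
        rw [sod_unfold n hpos, sod_unfold (n + 1) (by omega)]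
        by_cases h9 : n % 10 = 9
        · have hq : (n + 1) / 10 = n / 10 + 1 := by omega
          have hr : (n + 1) % 10 = 0 := by omega
          rw [hq, hr]
          have := ih (n / 10) (by omega) (by omega)
          omega
        · have hq : (n + 1) / 10 = n / 10 := by omega
          have hr : (n + 1) % 10 = n % 10 + 1 := by omega
          rw [hq, hr]
          omega

theorem sod_mono : ∀ (d : Nat) (x y : Int), 0 ≤ x → x ≤ y → (y - x).toNat ≤ d →
    x - sumofDigits x ≤ y - sumofDigits y := by
  intro d
  induction d with
  | zero =>
      intro x y hx hxy hd
      have he : x = y := by omega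
      rw [he]
  | succ d ih =>
      intro x y hx hxy hd
      by_cases he : x = y
      · subst he; omega
      · have h1 : x - sumofDigits x ≤ (y - 1) - sumofDigits (y - 1) :=
          ih x (y - 1) hx (by omega) (by omega)
        have h2 := sod_succ (y - 1).toNat (y - 1) le_rfl (by omega)
        have : y - 1 + 1 = y := by ring
        rw [this] at h2
        omega

theorem ncGo_mid_bounds (low high : Int) (h : low ≤ high) :
    low ≤ PySem.Int.floordiv (high + low) 2 ∧ PySem.Int.floordiv (high + low) 2 ≤ high := by
  have hb := PySem.Int.floordiv_two_mid_bounds (lo := low) (hi := high) h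
  rw [add_comm low high] at hb
  exact hb

theorem ncGoF_eq : ∀ (f : Nat) (low high k t : Int), (high + 1 - low).toNat ≤ f →
    1 ≤ low → low ≤ t → t ≤ high + 1 →
    (∀ x, 1 ≤ x → (k ≤ x - sumofDigits x ↔ t ≤ x)) →
    ncGoF f low high k = t - 1 := by
  intro f
  induction f with
  | zero =>
      intro low high k t hd h1 hlt hth Ht
      show high = t - 1
      omega
  | succ f ih =>
      intro low high k t hd h1 hlt hth Ht
      show (if low ≤ high then _ else high) = t - 1
      by_cases hle : low ≤ high
      · simp only [hle, if_true]
        have hmid := ncGo_mid_bounds low high hle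
        set mid := PySem.Int.floordiv (high + low) 2 with hm
        by_cases hc : mid - sumofDigits mid ≥ k
        · simp only [hc, if_true]
          have htm : t ≤ mid := (Ht mid (by omega)).mp hc
          exact ih low (mid - 1) k t (by omega) h1 hlt (by omega) Ht
        · simp only [hc, if_false]
          have htm : mid < t := by
            have := (Ht mid (by omega)).mpr
            by_contra hcon
            exact hc (this (by omega))
          exact ih (mid + 1) high k t (by omega) (by omega) (by omega) hth Ht
      · simp only [hle, if_false]
        omega

theorem ncGoF_all : ∀ (f : Nat) (low high k t : Int),
    1 ≤ low → high + 1 < t →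
    (∀ x, 1 ≤ x → (k ≤ x - sumofDigits x ↔ t ≤ x)) →
    ncGoF f low high k = high := by
  intro f
  induction f with
  | zero => intro low high k t h1 hth Ht; rfl
  | succ f ih =>
      intro low high k t h1 hth Ht
      show (if low ≤ high then _ else high) = high
      by_cases hle : low ≤ high
      · simp only [hle, if_true]
        have hmid := ncGo_mid_bounds low high hle
        set mid := PySem.Int.floordiv (high + low) 2 with hm
        have hc : ¬ mid - sumofDigits mid ≥ k := by
          intro hc
          have := (Ht mid (by omega)).mp hc
          omega
        simp only [hc, if_false]
        exact ih (mid + 1) high k t (by omega) hth Ht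
      · simp only [hle, if_false]

theorem bGoF_eq : ∀ (f : Nat) (x k t : Int), (t - x).toNat ≤ f →
    1 ≤ x → x ≤ t →
    (∀ y, 1 ≤ y → (k ≤ y - sumofDigits y ↔ t ≤ y)) →
    bGoF f x k = t := by
  intro f
  induction f with
  | zero =>
      intro x k t hd h1 hxt Ht
      show x = t
      omega
  | succ f ih =>
      intro x k t hd h1 hxt Ht
      show (if x - sumofDigits x < k then _ else x) = t
      by_cases hc : x - sumofDigits x < k
      · simp only [hc, if_true]
        have hxlt : x < t := by
          by_contra hcon
          have := (Ht x h1).mpr (by omega)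
          omega
        exact ih (x + 1) k t (by omega) (by omega) (by omega) Ht
      · simp only [hc, if_false]
        have := (Ht x h1).mp (by omega)
        omega

theorem numberCount_eq_alt (n k : Int) : numberCount n k = numberCount_alt n k := by
  have hex : ∃ m : Nat, k ≤ ((m : Int) + 1) - sumofDigits ((m : Int) + 1) := by
    by_cases hk : k ≤ 0
    · exact ⟨0, by norm_num [sod_one]; omega⟩
    · refine ⟨(2 * k + 19).toNat, ?_⟩
      have hX : ((2 * k + 19).toNat : Int) + 1 = 2 * k + 20 := by omega
      rw [hX]
      have h1 := sod_le_div (2 * k + 20) (by omega)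
      omega
  set N := Nat.find hex with hN
  set t : Int := (N : Int) + 1 with ht
  have hspec := Nat.find_spec hex
  rw [← hN, ← ht] at hspec
  have ht1 : 1 ≤ t := by omega
  have Ht : ∀ x, 1 ≤ x → (k ≤ x - sumofDigits x ↔ t ≤ x) := by
    intro x hx
    constructor
    · intro hfx
      by_contra hcon
      have hm : (x - 1).toNat < N := by omega
      have hmin := Nat.find_min hex hm
      have hxm : (((x - 1).toNat : Int)) + 1 = x := by omega
      rw [hxm] at hmin
      exact hmin hfx
    · intro htx
      have hmono := sod_mono (x - t).toNat t x (by omega) htx le_rfl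
      omega
  have hx0t : max k 1 ≤ t := by
    rcases le_total k 1 with h | h
    · rw [max_eq_right h]; omega
    · rw [max_eq_left h]
      by_contra hcon
      have hsk := sod_pos k.toNat k le_rfl (by omega)
      have := (Ht k (by omega)).mpr (by omega)
      omega
  have htop : t ≤ max (2 * k + 20) 1 := by
    rcases le_total k 0 with hk | hk
    · have h1 : k ≤ 1 - sumofDigits 1 := by rw [sod_one]; omega
      have := (Ht 1 le_rfl).mp h1
      omega
    · have hb := sod_le_div (2 * k + 20) (by omega)
      have := (Ht (2 * k + 20) (by omega)).mp (by omega)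
      omega
  have hbg : bGo (max k 1) k = t := by
    unfold bGo
    exact bGoF_eq _ (max k 1) k t (by omega) (by omega) hx0t Ht
  unfold numberCount numberCount_alt
  rw [hbg]
  by_cases hcase : t ≤ n + 1
  · rw [ncGoF_eq n.toNat 1 n k t (by omega) le_rfl ht1 hcase Ht]
    omega
  · rw [ncGoF_all n.toNat 1 n k t le_rfl (by omega) Ht]
    omega

-- ===== VERDICT (by name: the statement is the Claim_ definition above) =====
theorem numberCount_spec : Claim_equal_numberCount := by
  intro n k _
  unfold Spec_numberCount
  exact numberCount_eq_alt n k
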